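-- pv_equiv track=rewrite | github.com/matthewcesa/Projet-RO | code/degenere.py | reconstruire_cycle
-- ===== SOURCE A (Python) =====
-- def reconstruire_cycle(parent, u, v):
--     """
--     Reconstruit le cycle BFS à partir de deux nœuds u et v
--     tels que v est un voisin déjà visité mais pas parent.
--     """
--
--     chemin_u = []
--     chemin_v = []
--
--     # remonter depuis u
--     x = u
--     while x != -1:
--         chemin_u.append(x)
--         x = parent[x]
--
--     # remonter depuis v
--     y = v
--     while y != -1:
--         chemin_v.append(y)
--         y = parent[y]
--
--     # trouver le premier ancêtre commun
--     ancêtres_u = set(chemin_u)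
--
--     lca = None
--     for node in chemin_v:
--         if node in ancêtres_u:
--             lca = node
--             break
--
--     cycle = []
--
--     # partie de u → ancêtre commun
--     for node in chemin_u:
--         cycle.append(node)
--         if node == lca:
--             break
--
--     # partie de v → ancêtre commun (à l’envers)
--     path_v_to_lca = []
--     for node in chemin_v:
--         if node == lca:
--             break
--         path_v_to_lca.append(node)
--
--     cycle.extend(path_v_to_lca)
--
--     return cycle
-- ===== SOURCE B (Python) =====
-- def reconstruire_cycle(parent, u, v):
--     def chemin(x):
--         path = []
--         while x != -1:
--             path.append(x)
--             x = parent[x]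
--         return path
--
--     chemin_u = chemin(u)
--     chemin_v = chemin(v)
--
--     # length of the common suffix, found by aligning both paths from the roots
--     k = 0
--     for a, b in zip(reversed(chemin_u), reversed(chemin_v)):
--         if a != b:
--             break
--         k += 1
--
--     if k == 0:
--         # no common ancestor: disjoint trees (or an empty path)
--         return chemin_u + chemin_v
--     # u down to and including the LCA, then v's path strictly above the LCA
--     return chemin_u[:len(chemin_u) - k + 1] + chemin_v[:len(chemin_v) - k]
-- ===== Notes on version B (the rewrite author's own statement) =====
-- stated objective: simpler
-- what changed: B drops the ancestor set, the first-common-ancestor scan and the two break-loops: it aligns the two reversed root-paths in one parallel pass to get the common-suffix length k, then assembles the cycle with two slices.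
import Mathlib
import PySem

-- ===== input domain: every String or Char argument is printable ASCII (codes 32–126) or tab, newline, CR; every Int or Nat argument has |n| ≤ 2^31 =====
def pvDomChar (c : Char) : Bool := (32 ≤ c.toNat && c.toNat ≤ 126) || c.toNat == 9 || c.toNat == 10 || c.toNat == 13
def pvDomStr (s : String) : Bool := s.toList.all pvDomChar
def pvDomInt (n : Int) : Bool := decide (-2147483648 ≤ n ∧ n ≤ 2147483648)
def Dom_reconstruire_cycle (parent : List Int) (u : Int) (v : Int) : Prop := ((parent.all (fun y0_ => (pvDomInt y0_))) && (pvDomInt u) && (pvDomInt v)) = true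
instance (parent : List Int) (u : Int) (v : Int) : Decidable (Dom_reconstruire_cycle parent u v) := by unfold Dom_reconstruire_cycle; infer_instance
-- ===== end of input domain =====

-- B replaces A's ancestor set + first-common-ancestor scan + two break-loops by one
-- parallel alignment of the two reversed root-paths and two slices (objective: simpler).


-- ===== PORT A =====
-- the two 'while x != -1' climbs; fuel makes the loop total (Pre_ guarantees it is enough;
-- the 'none' arm of pyGet? is Python's IndexError, excluded by Pre_)
def pathLoopA (parent : List Int) : Nat → Int → List Int → List Int
  | 0, _, acc => acc
  | f + 1, x, acc =>
      if x = -1 then acc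
      else
        match PySem.List.pyGet? parent x with
        | none => acc
        | some p => pathLoopA parent f p (acc ++ [x])

-- 'for node in chemin_v: if node in ancêtres_u: lca = node; break'
def findLcaA (anc : PySem.Set Int) : List Int → Option Int
  | [] => none
  | node :: rest => if PySem.Set.contains anc node then some node else findLcaA anc rest

-- 'for node in chemin_u: cycle.append(node); if node == lca: break'
def cycleUA (lca : Option Int) : List Int → List Int
  | [] => []
  | node :: rest => node :: (if some node = lca then [] else cycleUA lca rest)

-- 'for node in chemin_v: if node == lca: break; path_v_to_lca.append(node)'
def pathVA (lca : Option Int) : List Int → List Int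
  | [] => []
  | node :: rest => if some node = lca then [] else node :: pathVA lca rest

def reconstruire_cycle (parent : List Int) (u : Int) (v : Int) : List Int :=
  let chemin_u := pathLoopA parent (2 * parent.length + 1) u []
  let chemin_v := pathLoopA parent (2 * parent.length + 1) v []
  let ancetres_u := PySem.Set.ofList chemin_u
  let lca := findLcaA ancetres_u chemin_v
  cycleUA lca chemin_u ++ pathVA lca chemin_v

-- ===== PORT B =====
-- the same 'while x != -1' climb (Source B's local helper 'chemin')
def cheminLoopB (parent : List Int) : Nat → Int → List Int → List Int
  | 0, _, path => path
  | f + 1, x, path =>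
      if x = -1 then path
      else
        match PySem.List.pyGet? parent x with
        | none => path
        | some p => cheminLoopB parent f p (path ++ [x])

-- 'for a, b in zip(reversed(chemin_u), reversed(chemin_v)): if a != b: break; k += 1'
def alignB : List Int → List Int → Nat
  | a :: as_, b :: bs => if a ≠ b then 0 else alignB as_ bs + 1
  | _, _ => 0

def reconstruire_cycle_alt (parent : List Int) (u : Int) (v : Int) : List Int :=
  let chemin_u := cheminLoopB parent (2 * parent.length + 1) u []
  let chemin_v := cheminLoopB parent (2 * parent.length + 1) v []
  let k := alignB chemin_u.reverse chemin_v.reverse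
  if k = 0 then chemin_u ++ chemin_v
  else chemin_u.take (chemin_u.length - k + 1) ++ chemin_v.take (chemin_v.length - k)

-- ===== PRECONDITION & SPEC =====
-- the list slot Python's parent[x] reads (negative x wraps from the end)
def pvIdx (parent : List Int) (x : Int) : Nat :=
  if 0 ≤ x then x.toNat else (x + parent.length).toNat

-- one application of the parent map: -1 is the root marker (absorbing); an index outside
-- [-len, len) goes to the absorbing failure marker 'len' (Python: IndexError)
def pvStep (parent : List Int) (x : Int) : Int :=
  if x = -1 then -1
  else if -(parent.length : Int) ≤ x ∧ x < (parent.length : Int) then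
    parent.getD (pvIdx parent x) 0
  else (parent.length : Int)

-- Pre_ admits exactly the inputs on which A's two while-loops terminate without an
-- exception: from u and from v, iterating the parent map (with Python's negative-index
-- wraparound) stays in range and reaches -1 (within 2*len(parent) steps, which
-- termination forces: at most 2*len-1 distinct in-range values).
def Pre_reconstruire_cycle (parent : List Int) (u : Int) (v : Int) : Prop :=
  (pvStep parent)^[2 * parent.length] u = -1 ∧ (pvStep parent)^[2 * parent.length] v = -1
instance (parent : List Int) (u : Int) (v : Int) : Decidable (Pre_reconstruire_cycle parent u v) := by
  unfold Pre_reconstruire_cycle; infer_instance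

def pvWitness_reconstruire_cycle : List Int × Int × Int := ([-1, 0, 0], 1, 2)

def Spec_reconstruire_cycle (parent : List Int) (u : Int) (v : Int) (out : List Int) : Prop := out = reconstruire_cycle_alt parent u v
instance (parent : List Int) (u : Int) (v : Int) (out : List Int) : Decidable (Spec_reconstruire_cycle parent u v out) := by unfold Spec_reconstruire_cycle; infer_instance

-- ===== CLAIM (what is proved, stated in full; the proofs are below) =====
def Claim_equal_reconstruire_cycle : Prop := ∀ (parent : List Int) (u : Int) (v : Int), Dom_reconstruire_cycle parent u v → Pre_reconstruire_cycle parent u v → Spec_reconstruire_cycle parent u v (reconstruire_cycle parent u v)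

-- ===== LEMMAS AND PROOFS =====

-- the two path loops are the same recursion
theorem loops_eq (parent : List Int) : ∀ (f : Nat) (x : Int) (acc : List Int),
    cheminLoopB parent f x acc = pathLoopA parent f x acc := by
  intro f
  induction f with
  | zero => intro x acc; rfl
  | succ f ih =>
      intro x acc
      simp only [cheminLoopB, pathLoopA]
      split
      · rfl
      · cases PySem.List.pyGet? parent x with
        | none => rfl
        | some p => exact ih p (acc ++ [x])

-- accumulator form
theorem pathLoopA_acc (parent : List Int) : ∀ (f : Nat) (x : Int) (acc : List Int),
    pathLoopA parent f x acc = acc ++ pathLoopA parent f x [] := by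
  intro f
  induction f with
  | zero => intro x acc; simp [pathLoopA]
  | succ f ih =>
      intro x acc
      simp only [pathLoopA]
      split
      · simp
      · cases hp : PySem.List.pyGet? parent x with
        | none => simp
        | some p =>
            dsimp only
            rw [ih p (acc ++ [x]), ih p ([] ++ [x])]
            simp

-- the failure marker is absorbing
theorem pvStep_marker (parent : List Int) :
    pvStep parent (parent.length : Int) = (parent.length : Int) := by
  simp [pvStep]

theorem pvStep_iterate_marker (parent : List Int) :
    ∀ k : Nat, (pvStep parent)^[k] (parent.length : Int) = (parent.length : Int) := by
  intro k
  induction k with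
  | zero => rfl
  | succ k ih => rw [Function.iterate_succ_apply, pvStep_marker]; exact ih

-- one reachability step
theorem pvReach_step (parent : List Int) (k : Nat) (x : Int)
    (hr : (pvStep parent)^[k + 1] x = -1) (hx : x ≠ -1) :
    (-(parent.length : Int) ≤ x ∧ x < (parent.length : Int)) ∧
      (pvStep parent)^[k] (parent.getD (pvIdx parent x) 0) = -1 := by
  rw [Function.iterate_succ_apply] at hr
  by_cases hv : -(parent.length : Int) ≤ x ∧ x < (parent.length : Int)
  · refine ⟨hv, ?_⟩
    have : pvStep parent x = parent.getD (pvIdx parent x) 0 := by simp [pvStep, hx, hv]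
    rwa [this] at hr
  · exfalso
    have : pvStep parent x = (parent.length : Int) := by simp [pvStep, hx, hv]
    rw [this, pvStep_iterate_marker] at hr
    omega

theorem pvGet_link (parent : List Int) (x : Int)
    (h1 : -(parent.length : Int) ≤ x) (h2 : x < (parent.length : Int)) :
    PySem.List.pyGet? parent x = some (parent.getD (pvIdx parent x) 0) := by
  by_cases h0 : 0 ≤ x
  · have hlt : x.toNat < parent.length := by omega
    rw [PySem.List.pyGet?_of_nonneg parent h0, List.getElem?_eq_getElem hlt]
    simp [pvIdx, h0, List.getD, List.getElem?_eq_getElem hlt]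
  · have hk0 : 0 < (-x).toNat := by omega
    have hkl : (-x).toNat ≤ parent.length := by omega
    have hxe : x = -(((-x).toNat : Nat) : Int) := by omega
    have hlt : parent.length - (-x).toNat < parent.length := by omega
    rw [hxe, PySem.List.pyGet?_neg_natCast parent (-x).toNat hk0 hkl,
        List.getElem?_eq_getElem hlt]
    have hidx : pvIdx parent (-(((-x).toNat : Nat) : Int)) = parent.length - (-x).toNat := by
      simp only [pvIdx]
      rw [if_neg (by omega)]
      omega
    rw [hidx, List.getD_eq_getElem parent 0 hlt]

-- fuel irrelevance on the reachable part
theorem path_stable (parent : List Int) :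
    ∀ (k : Nat) (x : Int), (pvStep parent)^[k] x = -1 →
    ∀ (f g : Nat), k < f → k < g →
    pathLoopA parent f x [] = pathLoopA parent g x [] := by
  intro k
  induction k with
  | zero =>
      intro x hr f g hf hg
      have hx : x = -1 := hr
      cases f with
      | zero => omega
      | succ f =>
          cases g with
          | zero => omega
          | succ g => simp [pathLoopA, hx]
  | succ k ih =>
      intro x hr f g hf hg
      cases f with
      | zero => omega
      | succ f =>
          cases g with
          | zero => omega
          | succ g =>
              by_cases hx : x = -1
              · simp [pathLoopA, hx]
              · obtain ⟨⟨h1, h2⟩, hr'⟩ := pvReach_step parent k x hr hx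
                have hp := pvGet_link parent x h1 h2
                simp only [pathLoopA, if_neg hx, hp]
                rw [pathLoopA_acc parent f _ ([] ++ [x]), pathLoopA_acc parent g _ ([] ++ [x])]
                rw [ih (parent.getD (pvIdx parent x) 0) hr' f g (by omega) (by omega)]

-- the canonical root path
def pathOf (parent : List Int) (x : Int) : List Int :=
  pathLoopA parent (2 * parent.length + 1) x []

theorem pathOf_neg_one (parent : List Int) : pathOf parent (-1) = [] := by
  simp [pathOf, pathLoopA]

theorem pathOf_cons (parent : List Int) (k : Nat) (x : Int)
    (hr : (pvStep parent)^[k] x = -1) (hk : k ≤ 2 * parent.length) (hx : x ≠ -1) :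
    pathOf parent x = x :: pathOf parent (parent.getD (pvIdx parent x) 0) := by
  cases k with
  | zero => exact absurd hr hx
  | succ k =>
      obtain ⟨⟨h1, h2⟩, hr'⟩ := pvReach_step parent k x hr hx
      have hp := pvGet_link parent x h1 h2
      show pathLoopA parent (2 * parent.length + 1) x [] = _
      simp only [pathLoopA, if_neg hx, hp]
      rw [pathLoopA_acc parent (2 * parent.length) _ ([] ++ [x])]
      rw [path_stable parent k (parent.getD (pvIdx parent x) 0) hr' (2 * parent.length)
            (2 * parent.length + 1) (by omega) (by omega)]
      simp [pathOf]

theorem pathOf_mem (parent : List Int) :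
    ∀ (k : Nat) (x : Int), (pvStep parent)^[k] x = -1 → k ≤ 2 * parent.length →
    ∀ y ∈ pathOf parent x, ∃ j, j ≤ k ∧ (pvStep parent)^[j] y = -1 ∧ y ≠ -1 := by
  intro k
  induction k with
  | zero =>
      intro x hr _ y hy
      have hx : x = -1 := hr
      rw [hx, pathOf_neg_one] at hy
      simp at hy
  | succ k ih =>
      intro x hr hk y hy
      by_cases hx : x = -1
      · rw [hx, pathOf_neg_one] at hy; simp at hy
      · obtain ⟨⟨h1, h2⟩, hr'⟩ := pvReach_step parent k x hr hx
        rw [pathOf_cons parent (k + 1) x hr hk hx] at hy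
        rcases List.mem_cons.mp hy with h | h
        · subst h; exact ⟨k + 1, le_refl _, hr, hx⟩
        · obtain ⟨j, hj1, hj2, hj3⟩ := ih (parent.getD (pvIdx parent x) 0) hr' (by omega) y h
          exact ⟨j, by omega, hj2, hj3⟩

theorem pathOf_suffix (parent : List Int) :
    ∀ (k : Nat) (x : Int), (pvStep parent)^[k] x = -1 → k ≤ 2 * parent.length →
    ∀ y ∈ pathOf parent x, ∃ pre, pathOf parent x = pre ++ pathOf parent y ∧ y ∉ pre := by
  intro k
  induction k with
  | zero =>
      intro x hr _ y hy
      have hx : x = -1 := hr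
      rw [hx, pathOf_neg_one] at hy
      simp at hy
  | succ k ih =>
      intro x hr hk y hy
      by_cases hx : x = -1
      · rw [hx, pathOf_neg_one] at hy; simp at hy
      · obtain ⟨⟨h1, h2⟩, hr'⟩ := pvReach_step parent k x hr hx
        have hcons := pathOf_cons parent (k + 1) x hr hk hx
        rw [hcons] at hy
        by_cases hyx : y = x
        · exact ⟨[], by simp [hyx], by simp⟩
        · have hy' : y ∈ pathOf parent (parent.getD (pvIdx parent x) 0) := by
            rcases List.mem_cons.mp hy with h | h
            · exact absurd h hyx
            · exact h
          obtain ⟨pre', hpre', hny⟩ := ih (parent.getD (pvIdx parent x) 0) hr' (by omega) y hy'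
          exact ⟨x :: pre', by rw [hcons, hpre']; rfl, by simp [hyx, hny]⟩

-- ===== A-side loop characterisations =====

theorem cycleUA_none (l : List Int) : cycleUA none l = l := by
  induction l with
  | nil => rfl
  | cons a l ih => simp [cycleUA, ih]

theorem pathVA_none (l : List Int) : pathVA none l = l := by
  induction l with
  | nil => rfl
  | cons a l ih => simp [pathVA, ih]

theorem cycleUA_first (c : Int) (rest : List Int) :
    ∀ pre : List Int, c ∉ pre → cycleUA (some c) (pre ++ c :: rest) = pre ++ [c] := by
  intro pre
  induction pre with
  | nil => intro _; simp [cycleUA]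
  | cons a pre ih =>
      intro h
      have ha : a ≠ c := by intro he; exact h (by simp [he])
      have h' : c ∉ pre := fun hc => h (by simp [hc])
      simp only [List.cons_append, cycleUA]
      rw [if_neg (by simp [ha]), ih h']

theorem pathVA_first (c : Int) (rest : List Int) :
    ∀ pre : List Int, c ∉ pre → pathVA (some c) (pre ++ c :: rest) = pre := by
  intro pre
  induction pre with
  | nil => intro _; simp [pathVA]
  | cons a pre ih =>
      intro h
      have ha : a ≠ c := by intro he; exact h (by simp [he])
      have h' : c ∉ pre := fun hc => h (by simp [hc])
      simp only [List.cons_append, pathVA]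
      rw [if_neg (by simp [ha]), ih h']

theorem findLcaA_none (cu : List Int) : ∀ cv : List Int,
    findLcaA (PySem.Set.ofList cu) cv = none → ∀ b ∈ cv, b ∉ cu := by
  intro cv
  induction cv with
  | nil => intro _ b hb; simp at hb
  | cons a cv ih =>
      intro h b hb
      simp only [findLcaA] at h
      split at h
      · exact absurd h (by simp)
      · rcases List.mem_cons.mp hb with he | he
        · subst he
          intro hbc
          rename_i hcond
          exact hcond (by rw [PySem.Set.contains_iff]; exact (PySem.Set.mem_ofList _ _).mpr hbc)
        · exact ih h b he

theorem findLcaA_some (cu : List Int) : ∀ (cv : List Int) (c : Int),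
    findLcaA (PySem.Set.ofList cu) cv = some c →
    ∃ pre rest, cv = pre ++ c :: rest ∧ (∀ b ∈ pre, b ∉ cu) ∧ c ∈ cu := by
  intro cv
  induction cv with
  | nil => intro c h; simp [findLcaA] at h
  | cons a cv ih =>
      intro c h
      simp only [findLcaA] at h
      split at h
      · rename_i hcond
        have : a = c := Option.some.inj h
        subst this
        refine ⟨[], cv, by simp, by simp, ?_⟩
        exact (PySem.Set.mem_ofList _ _).mp ((PySem.Set.contains_iff _ _).mp hcond)
      · rename_i hcond
        obtain ⟨pre, rest, h1, h2, h3⟩ := ih c h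
        refine ⟨a :: pre, rest, by simp [h1], ?_, h3⟩
        intro b hb
        rcases List.mem_cons.mp hb with he | he
        · subst he
          intro hbc
          exact hcond (by rw [PySem.Set.contains_iff]; exact (PySem.Set.mem_ofList _ _).mpr hbc)
        · exact h2 b he

-- ===== B-side alignment =====

theorem alignB_common : ∀ (p a b : List Int),
    alignB (p ++ a) (p ++ b) = p.length + alignB a b := by
  intro p
  induction p with
  | nil => intro a b; simp
  | cons h p ih => intro a b; simp [alignB, ih]; omega

theorem alignB_pos : ∀ (a b : List Int), 0 < alignB a b →
    ∃ d a' b', a = d :: a' ∧ b = d :: b' := by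
  intro a b h
  cases a with
  | nil => simp [alignB] at h
  | cons x a' =>
      cases b with
      | nil => simp [alignB] at h
      | cons y b' =>
          simp only [alignB] at h
          split at h
          · omega
          · rename_i hne
            have : x = y := by by_contra hc; exact hne hc
            exact ⟨x, a', b', rfl, by rw [this]⟩

-- first-occurrence decompositions are unique
theorem first_occ_unique (c : Int) : ∀ (p1 p2 r1 r2 : List Int),
    p1 ++ c :: r1 = p2 ++ c :: r2 → c ∉ p1 → c ∉ p2 → p1 = p2 := by
  intro p1
  induction p1 with
  | nil =>
      intro p2 r1 r2 he h1 h2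
      cases p2 with
      | nil => rfl
      | cons a p2 =>
          simp only [List.nil_append, List.cons_append, List.cons.injEq] at he
          exact absurd (by simp [he.1]) h2
  | cons a p1 ih =>
      intro p2 r1 r2 he h1 h2
      cases p2 with
      | nil =>
          simp only [List.cons_append, List.nil_append, List.cons.injEq] at he
          exact absurd (by simp [he.1]) h1
      | cons b p2 =>
          simp only [List.cons_append, List.cons.injEq] at he
          have h1' : c ∉ p1 := fun hc => h1 (by simp [hc])
          have h2' : c ∉ p2 := fun hc => h2 (by simp [hc])
          rw [he.1, ih p2 r1 r2 he.2 h1' h2']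

-- ===== main theorem =====

theorem main_eq (parent : List Int) (u v : Int)
    (hpre : Pre_reconstruire_cycle parent u v) :
    reconstruire_cycle parent u v = reconstruire_cycle_alt parent u v := by
  obtain ⟨hu, hv⟩ := hpre
  unfold reconstruire_cycle reconstruire_cycle_alt
  simp only [loops_eq]
  set cu := pathLoopA parent (2 * parent.length + 1) u [] with hcu
  set cv := pathLoopA parent (2 * parent.length + 1) v [] with hcv
  have hcu' : cu = pathOf parent u := rfl
  have hcv' : cv = pathOf parent v := rfl
  cases hfind : findLcaA (PySem.Set.ofList cu) cv with
  | none =>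
      have hdisj := findLcaA_none cu cv hfind
      have hk : alignB cu.reverse cv.reverse = 0 := by
        by_contra hk
        obtain ⟨d, a', b', ha, hb⟩ := alignB_pos _ _ (Nat.pos_of_ne_zero hk)
        have hdu : d ∈ cu := by
          rw [← List.mem_reverse, ha]; simp
        have hdv : d ∈ cv := by
          rw [← List.mem_reverse, hb]; simp
        exact hdisj d hdv hdu
      rw [hk, if_pos rfl, cycleUA_none, pathVA_none]
  | some c =>
      obtain ⟨pre1, rest1, hsplit, hnotin, hcmem⟩ := findLcaA_some cu cv c hfind
      -- c is on both root paths; take the canonical suffix decompositions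
      have hcv_mem : c ∈ cv := by rw [hsplit]; simp
      obtain ⟨preu, hpreu, hcnu⟩ :=
        pathOf_suffix parent (2 * parent.length) u hu (le_refl _) c (by rw [← hcu']; exact hcmem)
      obtain ⟨prev, hprev, hcnv⟩ :=
        pathOf_suffix parent (2 * parent.length) v hv (le_refl _) c (by rw [← hcv']; exact hcv_mem)
      obtain ⟨j, hj1, hj2, hj3⟩ :=
        pathOf_mem parent (2 * parent.length) v hv (le_refl _) c (by rw [← hcv']; exact hcv_mem)
      -- unfold the path from c one step
      have hcpath : pathOf parent c = c :: pathOf parent (parent.getD (pvIdx parent c) 0) :=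
        pathOf_cons parent j c hj2 hj1 hj3
      set tl := pathOf parent (parent.getD (pvIdx parent c) 0) with htl
      have hcu2 : cu = preu ++ c :: tl := by rw [hcu', hpreu, hcpath]
      have hcv2 : cv = prev ++ c :: tl := by rw [hcv', hprev, hcpath]
      -- the find? prefix is the first-occurrence prefix
      have hcn1 : c ∉ pre1 := fun hc => (hnotin c hc) hcmem
      have hpre_eq : prev = pre1 := by
        rw [hcv2] at hsplit
        exact first_occ_unique c prev pre1 tl rest1 hsplit hcnv hcn1
      have hprev_notin : ∀ b ∈ prev, b ∉ cu := by rw [hpre_eq]; exact hnotin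
      -- A's value
      have hA : cycleUA (some c) cu ++ pathVA (some c) cv = (preu ++ [c]) ++ prev := by
        rw [hcu2, hcv2, cycleUA_first c tl preu hcnu, pathVA_first c tl prev hcnv]
      -- B's value
      have hrev_u : cu.reverse = (c :: tl).reverse ++ preu.reverse := by
        rw [hcu2]; simp
      have hrev_v : cv.reverse = (c :: tl).reverse ++ prev.reverse := by
        rw [hcv2]; simp
      have halign0 : alignB preu.reverse prev.reverse = 0 := by
        by_contra hk
        obtain ⟨d, a', b', ha, hb⟩ := alignB_pos _ _ (Nat.pos_of_ne_zero hk)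
        have hdu : d ∈ preu := by rw [← List.mem_reverse, ha]; simp
        have hdv : d ∈ prev := by rw [← List.mem_reverse, hb]; simp
        exact hprev_notin d hdv (by rw [hcu2]; exact List.mem_append_left _ hdu)
      have hk : alignB cu.reverse cv.reverse = tl.length + 1 := by
        rw [hrev_u, hrev_v, alignB_common, halign0]
        simp
      rw [hA, hk, if_neg (by omega)]
      have htake_u : cu.take (cu.length - (tl.length + 1) + 1) = preu ++ [c] := by
        rw [hcu2]
        have hlen : (preu ++ c :: tl).length - (tl.length + 1) + 1 = preu.length + 1 := by
          simp
        rw [hlen, show c :: tl = [c] ++ tl from rfl, ← List.append_assoc,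
            List.take_append_of_le_length (by simp)]
        simp
      have htake_v : cv.take (cv.length - (tl.length + 1)) = prev := by
        rw [hcv2]
        have hlen : (prev ++ c :: tl).length - (tl.length + 1) = prev.length := by
          simp
        rw [hlen, List.take_left]
      rw [htake_u, htake_v]

-- ===== VERDICT (by name: the statement is the Claim_ definition above) =====
theorem reconstruire_cycle_spec : Claim_equal_reconstruire_cycle := by
  intro parent u v _ hpre
  unfold Spec_reconstruire_cycle
  exact main_eq parent u v hpre
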